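-- pv_equiv track=rewrite | github.com/wcwright124/my_sols | epi_judge_python/bonus.py | calculate_bonus
-- ===== SOURCE A (Python) =====
-- def calculate_bonus(productivity): # O(n) time | O(n) space
--     # TODO - you fill in here.
--     ticks = [1 for _ in productivity]
--     for i in range(1, len(productivity)):
--         if productivity[i] > productivity[i - 1]:
--             ticks[i] = 1 + ticks[i - 1]
--     for i in range(len(productivity) - 2, -1, -1):
--         if productivity[i] > productivity[i + 1]:
--             ticks[i] = max(ticks[i], 1 + ticks[i + 1])
--     return sum(ticks)
-- ===== SOURCE B (Python) =====
-- def calculate_bonus(productivity):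
--     # Single forward pass over adjacent pairs with up/down/peak counters
--     # and a running total; no ticks array and no second sweep.
--     if not productivity:
--         return 0
--     total = 1
--     up = down = peak = 0
--     prev = productivity[0]
--     for cur in productivity[1:]:
--         if cur > prev:
--             up += 1
--             down = 0
--             peak = up
--             total += 1 + up
--         elif cur == prev:
--             up = down = peak = 0
--             total += 1
--         else:
--             up = 0
--             down += 1
--             total += 1 + down
--             if peak >= down:
--                 total -= 1
--         prev = cur
--     return total
-- ===== Notes on version B (the rewrite author's own statement) =====
-- stated objective: alternative
-- what changed: Replaced the ticks array with its forward sweep, backward max-sweep and final sum by a single forward pass over adjacent pairs that maintains up/down/peak run counters and a running total (one pass and O(1) extra space instead of three passes and an O(n) array).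
import Mathlib
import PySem

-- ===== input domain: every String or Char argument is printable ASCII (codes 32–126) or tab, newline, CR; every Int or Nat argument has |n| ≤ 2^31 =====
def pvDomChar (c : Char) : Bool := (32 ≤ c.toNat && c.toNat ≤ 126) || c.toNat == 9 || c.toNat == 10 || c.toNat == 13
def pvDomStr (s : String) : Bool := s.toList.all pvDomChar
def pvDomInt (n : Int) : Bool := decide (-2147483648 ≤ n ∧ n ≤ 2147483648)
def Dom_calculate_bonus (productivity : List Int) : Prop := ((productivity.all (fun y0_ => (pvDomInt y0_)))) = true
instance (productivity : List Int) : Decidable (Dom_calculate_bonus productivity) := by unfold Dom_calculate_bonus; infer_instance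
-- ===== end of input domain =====

-- B replaces A's ticks array with its forward sweep, backward max-sweep and sum by one forward
-- pass with up/down/peak run counters and a running total; equivalence proved for every input.

-- ===== PORT A =====
-- literal transliteration: ticks array of 1s, forward sweep, backward max-sweep, sum
-- (indices produced by the ranges are always in bounds, so the total forms pyGetD/pySetD are exact)
def calculate_bonus (productivity : List Int) : Int :=
  let n : Int := productivity.length
  let ticks0 : List Int := productivity.map (fun _ => (1 : Int))
  let ticks1 : List Int :=
    (PySem.List.pyRange 1 n 1).foldl (fun t i =>
      if PySem.List.pyGetD productivity i 0 > PySem.List.pyGetD productivity (i - 1) 0 then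
        PySem.List.pySetD t i (1 + PySem.List.pyGetD t (i - 1) 0)
      else t) ticks0
  let ticks2 : List Int :=
    (PySem.List.pyRange (n - 2) (-1) (-1)).foldl (fun t i =>
      if PySem.List.pyGetD productivity i 0 > PySem.List.pyGetD productivity (i + 1) 0 then
        PySem.List.pySetD t i (max (PySem.List.pyGetD t i 0) (1 + PySem.List.pyGetD t (i + 1) 0))
      else t) ticks1
  ticks2.sum

-- ===== PORT B =====
-- Source B's loop: state (prev, up, down, peak, total), one step per remaining element
def pvGoB (prev up down peak total : Int) : List Int → Int
  | [] => total
  | c :: t =>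
    if c > prev then pvGoB c (up + 1) 0 (up + 1) (total + (1 + (up + 1))) t
    else if c = prev then pvGoB c 0 0 0 (total + 1) t
    else pvGoB c 0 (down + 1) peak
      (total + (1 + (down + 1)) - (if peak ≥ down + 1 then 1 else 0)) t

def calculate_bonus_alt (productivity : List Int) : Int :=
  match productivity with
  | [] => 0
  | x :: t => pvGoB x 0 0 0 1 t

-- ===== PRECONDITION & SPEC =====
def Spec_calculate_bonus (productivity : List Int) (out : Int) : Prop := out = calculate_bonus_alt productivity
instance (productivity : List Int) (out : Int) : Decidable (Spec_calculate_bonus productivity out) := by unfold Spec_calculate_bonus; infer_instance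

-- ===== CLAIM (what is proved, stated in full; the proofs are below) =====
def Claim_equal_calculate_bonus : Prop := ∀ (productivity : List Int), Dom_calculate_bonus productivity → Spec_calculate_bonus productivity (calculate_bonus productivity)

-- ===== LEMMAS AND PROOFS =====

-- length of the strictly decreasing run of l continuing downward from prev
def pvKK (prev : Int) : List Int → Int
  | [] => 0
  | c :: t => if c < prev then 1 + pvKK c t else 0

-- forward bonus values (lengths of strictly increasing runs), u = value at prev
def pvUpsFrom (u prev : Int) : List Int → List Int
  | [] => []
  | c :: t => (if c > prev then u + 1 else 1) :: pvUpsFrom (if c > prev then u + 1 else 1) c t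

def pvUps : List Int → List Int
  | [] => []
  | x :: t => 1 :: pvUpsFrom 1 x t

-- backward bonus values (lengths of strictly decreasing runs)
def pvDowns : List Int → List Int
  | [] => []
  | c :: t => (pvKK c t + 1) :: pvDowns t

-- sum of pointwise max of ups and downs, computed with the ups value carried along
def pvW (u prev : Int) : List Int → Int
  | [] => 0
  | c :: t => max (if c > prev then u + 1 else 1) (pvKK c t + 1) + pvW (if c > prev then u + 1 else 1) c t

-- the common specification value
def pvS (p : List Int) : Int := (List.zipWith max (pvUps p) (pvDowns p)).sum

lemma pvKK_nonneg (prev : Int) (l : List Int) : 0 ≤ pvKK prev l := by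
  induction l generalizing prev with
  | nil => simp [pvKK]
  | cons c t ih =>
    have := ih c
    simp only [pvKK]
    split <;> omega

-- ===== B-side: the single pass computes pvS =====

lemma pvGoB_eq (l : List Int) : ∀ prev up down peak total : Int, 0 ≤ up → 0 ≤ down → 0 ≤ peak →
    (down = 0 → peak = up) → (0 < down → up = 0) →
    pvGoB prev up down peak total l =
      total + pvW (up + 1) prev l + pvKK prev l * down + pvKK prev l
        - min (pvKK prev l) (max (peak - down) 0) := by
  induction l with
  | nil => intro prev up down peak total hup hdown hpeak hdp hdu
           simp [pvGoB, pvW, pvKK]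
  | cons c t ih =>
    intro prev up down peak total hup hdown hpeak hdp hdu
    have hk := pvKK_nonneg c t
    by_cases hgt : c > prev
    · have hlt : ¬ c < prev := by omega
      rw [show pvGoB prev up down peak total (c :: t) =
            pvGoB c (up + 1) 0 (up + 1) (total + (1 + (up + 1))) t by simp [pvGoB, hgt]]
      rw [ih c (up+1) 0 (up+1) _ (by omega) (by omega) (by omega) (by omega) (by omega)]
      simp only [pvKK, pvW, if_pos hgt, if_neg hlt]
      omega
    · by_cases heq : c = prev
      · have hlt : ¬ c < prev := by omega
        rw [show pvGoB prev up down peak total (c :: t) =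
              pvGoB c 0 0 0 (total + 1) t by simp [pvGoB, heq]]
        rw [ih c 0 0 0 _ (by omega) (by omega) (by omega) (by omega) (by omega)]
        simp only [pvKK, pvW, if_neg hgt, if_neg hlt, zero_add]
        omega
      · have hlt : c < prev := by omega
        rw [show pvGoB prev up down peak total (c :: t) =
              pvGoB c 0 (down + 1) peak
                (total + (1 + (down + 1)) - (if peak ≥ down + 1 then 1 else 0)) t by
            simp [pvGoB, hgt, heq]]
        rw [ih c 0 (down+1) peak _ (by omega) (by omega) (by omega) (by omega) (by omega)]
        simp only [pvKK, pvW, if_neg hgt, if_pos hlt, zero_add]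
        have e1 : pvKK c t * (down + 1) = pvKK c t * down + pvKK c t := by ring
        have e2 : (1 + pvKK c t) * down = pvKK c t * down + down := by ring
        rw [e1, e2]
        generalize pvKK c t * down = m
        split_ifs with hpk <;> omega

lemma pvW_eq (t : List Int) : ∀ u prev : Int,
    pvW u prev t = (List.zipWith max (pvUpsFrom u prev t) (pvDowns t)).sum := by
  induction t with
  | nil => intro u prev; simp [pvW, pvUpsFrom, pvDowns]
  | cons c t ih => intro u prev; simp [pvW, pvUpsFrom, pvDowns, ih]

lemma alt_eq_pvS (p : List Int) : calculate_bonus_alt p = pvS p := by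
  cases p with
  | nil => simp [calculate_bonus_alt, pvS, pvUps, pvDowns]
  | cons x t =>
    have hk := pvKK_nonneg x t
    show pvGoB x 0 0 0 1 t = pvS (x :: t)
    rw [pvGoB_eq t x 0 0 0 1 (by omega) (by omega) (by omega) (by omega) (by omega)]
    simp only [zero_add]
    have : pvS (x :: t) = max 1 (pvKK x t + 1) + (List.zipWith max (pvUpsFrom 1 x t) (pvDowns t)).sum := by
      simp [pvS, pvUps, pvDowns]
    rw [this, ← pvW_eq]
    omega

-- ===== A-side: the two sweeps compute pvS =====

-- named copies of the two loop bodies (definitionally the lambdas in the port)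
def pvStep1 (p : List Int) (t : List Int) (i : Int) : List Int :=
  if PySem.List.pyGetD p i 0 > PySem.List.pyGetD p (i - 1) 0 then
    PySem.List.pySetD t i (1 + PySem.List.pyGetD t (i - 1) 0)
  else t

def pvStep2 (p : List Int) (t : List Int) (i : Int) : List Int :=
  if PySem.List.pyGetD p i 0 > PySem.List.pyGetD p (i + 1) 0 then
    PySem.List.pySetD t i (max (PySem.List.pyGetD t i 0) (1 + PySem.List.pyGetD t (i + 1) 0))
  else t

lemma calculate_bonus_eq (p : List Int) :
    calculate_bonus p =
      ((PySem.List.pyRange ((p.length : Int) - 2) (-1) (-1)).foldl (pvStep2 p)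
        ((PySem.List.pyRange 1 (p.length : Int) 1).foldl (pvStep1 p)
          (p.map (fun _ => (1 : Int))))).sum := rfl

lemma pv_getD_set_self (l : List Int) (i : Nat) (v : Int) (h : i < l.length) :
    (l.set i v).getD i 0 = v := by
  rw [List.getD_eq_getElem _ _ (by simpa using h)]; simp

lemma pv_getD_set_ne (l : List Int) (i j : Nat) (v : Int) (h : i ≠ j) :
    (l.set i v).getD j 0 = l.getD j 0 := by
  simp [List.getD, h]

lemma pv_getD_natCast (l : List Int) (n : Nat) :
    PySem.List.pyGetD l (n : Int) 0 = l.getD n 0 := by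
  simp [PySem.List.pyGetD_natCast]

lemma pvUpsFrom_length (t : List Int) : ∀ u prev : Int, (pvUpsFrom u prev t).length = t.length := by
  induction t with
  | nil => intro u prev; rfl
  | cons c t ih => intro u prev; simp [pvUpsFrom, ih]

lemma pvUps_length (p : List Int) : (pvUps p).length = p.length := by
  cases p with
  | nil => rfl
  | cons x t => simp [pvUps, pvUpsFrom_length]

lemma pvDowns_length (p : List Int) : (pvDowns p).length = p.length := by
  induction p with
  | nil => rfl
  | cons c t ih => simp [pvDowns, ih]

lemma pvDowns_get (p : List Int) : ∀ i : Nat, ∀ h : i < p.length,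
    (pvDowns p).getD i 0 = pvKK (p[i]) (p.drop (i+1)) + 1 := by
  induction p with
  | nil => intro i h; simp at h
  | cons c t ih =>
    intro i h
    cases i with
    | zero => simp [pvDowns]
    | succ j => simpa [pvDowns] using ih j (by simpa using h)

lemma pvDowns_pos (p : List Int) (i : Nat) (h : i < p.length) :
    1 ≤ (pvDowns p).getD i 0 := by
  rw [pvDowns_get p i h]
  have := pvKK_nonneg (p[i]) (p.drop (i+1))
  omega

lemma pvDowns_succ (p : List Int) (i : Nat) (h : i + 1 < p.length) :
    (pvDowns p).getD i 0 =
      if p.getD i 0 > p.getD (i+1) 0 then (pvDowns p).getD (i+1) 0 + 1 else 1 := by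
  rw [pvDowns_get p i (by omega), pvDowns_get p (i+1) h]
  rw [List.drop_eq_getElem_cons h]
  rw [List.getD_eq_getElem _ _ (by omega), List.getD_eq_getElem _ _ h]
  simp only [pvKK]
  by_cases hc : p[i+1] < p[i]
  · rw [if_pos hc, if_pos (by omega)]; ring
  · rw [if_neg hc, if_neg (by omega)]
    norm_num

lemma pvDowns_last (p : List Int) (h : p ≠ []) :
    (pvDowns p).getD (p.length - 1) 0 = 1 := by
  have hl : p.length - 1 < p.length := by
    cases p with
    | nil => exact absurd rfl h
    | cons a l => simp
  rw [pvDowns_get p _ hl]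
  have : p.drop (p.length - 1 + 1) = [] := by
    apply List.drop_eq_nil_of_le; omega
  rw [this]
  simp [pvKK]

lemma pvUpsFrom_mem (t : List Int) : ∀ u prev : Int, 1 ≤ u → ∀ x ∈ pvUpsFrom u prev t, 1 ≤ x := by
  induction t with
  | nil => intro u prev _ x hx; simp [pvUpsFrom] at hx
  | cons c t ih =>
    intro u prev hu x hx
    simp only [pvUpsFrom, List.mem_cons] at hx
    rcases hx with h | h
    · subst h; split <;> omega
    · exact ih _ c (by split <;> omega) x h

lemma pvUps_mem (p : List Int) : ∀ x ∈ pvUps p, 1 ≤ x := by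
  cases p with
  | nil => intro x hx; simp [pvUps] at hx
  | cons y t =>
    intro x hx
    simp only [pvUps, List.mem_cons] at hx
    rcases hx with hx | hx
    · omega
    · exact pvUpsFrom_mem t 1 y (by omega) x hx

lemma pvUps_pos (p : List Int) (i : Nat) (h : i < p.length) :
    1 ≤ (pvUps p).getD i 0 := by
  have hl : i < (pvUps p).length := by rw [pvUps_length]; exact h
  rw [List.getD_eq_getElem _ _ hl]
  exact pvUps_mem p _ ((pvUps p).getElem_mem hl)

lemma pvUpsFrom_succ (t : List Int) : ∀ u prev : Int, ∀ i : Nat, i + 1 < t.length →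
    (pvUpsFrom u prev t).getD (i+1) 0 =
      if t.getD (i+1) 0 > t.getD i 0 then (pvUpsFrom u prev t).getD i 0 + 1 else 1 := by
  induction t with
  | nil => intro u prev i h; simp at h
  | cons c t ih =>
    intro u prev i h
    cases i with
    | zero =>
      cases t with
      | nil => simp at h
      | cons d t' =>
        simp [pvUpsFrom]
    | succ j =>
      have h' : j + 1 < t.length := by simpa using h
      simp only [pvUpsFrom, List.getD_cons_succ]
      exact ih _ c j h'

lemma pvUps_succ (p : List Int) (i : Nat) (h : i + 1 < p.length) :
    (pvUps p).getD (i+1) 0 =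
      if p.getD (i+1) 0 > p.getD i 0 then (pvUps p).getD i 0 + 1 else 1 := by
  cases p with
  | nil => simp at h
  | cons x t =>
    cases i with
    | zero =>
      cases t with
      | nil => simp at h
      | cons d t' =>
        simp [pvUps, pvUpsFrom]
    | succ j =>
      have h' : j + 1 < t.length := by simpa using h
      simp only [pvUps, List.getD_cons_succ]
      exact pvUpsFrom_succ t 1 x j h'

-- forward sweep: after processing indices 1..m-1, the prefix below m holds the ups values
lemma pv_loop1 (p : List Int) : ∀ m : Nat, 1 ≤ m → m ≤ p.length →
    ((PySem.List.pyRange 1 (m : Int) 1).foldl (pvStep1 p) (p.map (fun _ => (1:Int)))).length = p.length ∧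
    ∀ i : Nat, i < p.length →
      ((PySem.List.pyRange 1 (m : Int) 1).foldl (pvStep1 p) (p.map (fun _ => (1:Int)))).getD i 0 =
        if i < m then (pvUps p).getD i 0 else 1 := by
  intro m
  induction m with
  | zero => intro h; omega
  | succ m ih =>
    intro _ hle
    by_cases hm : m = 0
    · subst hm
      rw [show ((0:Nat)+1 : Nat) = (1:Nat) by rfl]
      rw [show ((1:Nat) : Int) = (1:Int) by simp]
      rw [PySem.List.pyRange_one_eq_nil (by omega)]
      constructor
      · simp
      · intro i hi
        simp only [List.foldl_nil]
        rw [List.getD_eq_getElem _ _ (by simpa using hi), List.getElem_map]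
        by_cases h0 : i < 1
        · have : i = 0 := by omega
          subst this
          cases p with
          | nil => simp at hi
          | cons x t => simp [pvUps]
        · rw [if_neg h0]
    · have hm1 : 1 ≤ m := by omega
      have hmlt : m < p.length := by omega
      obtain ⟨ihlen, ihget⟩ := ih hm1 (by omega)
      have hsplit : PySem.List.pyRange 1 ((m+1 : Nat) : Int) 1 =
          PySem.List.pyRange 1 (m : Int) 1 ++ [(m : Int)] := by
        push_cast
        exact PySem.List.pyRange_one_succ_right (by exact_mod_cast hm1)
      rw [hsplit, List.foldl_append]
      set r := (PySem.List.pyRange 1 (m : Int) 1).foldl (pvStep1 p) (p.map (fun _ => (1:Int))) with hr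
      simp only [List.foldl_cons, List.foldl_nil]
      have hcast : ((m : Int) - 1) = ((m - 1 : Nat) : Int) := by omega
      have hgp : PySem.List.pyGetD p (m : Int) 0 = p.getD m 0 := pv_getD_natCast p m
      have hgp' : PySem.List.pyGetD p ((m : Int) - 1) 0 = p.getD (m-1) 0 := by
        rw [hcast]; exact pv_getD_natCast p (m-1)
      have hgr' : PySem.List.pyGetD r ((m : Int) - 1) 0 = r.getD (m-1) 0 := by
        rw [hcast]; exact pv_getD_natCast r (m-1)
      have hups : (pvUps p).getD m 0 =
          if p.getD m 0 > p.getD (m-1) 0 then (pvUps p).getD (m-1) 0 + 1 else 1 := by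
        have := pvUps_succ p (m-1) (by omega)
        rw [show m - 1 + 1 = m by omega] at this
        exact this
      have hrm1 : r.getD (m-1) 0 = (pvUps p).getD (m-1) 0 := by
        rw [ihget (m-1) (by omega), if_pos (by omega)]
      unfold pvStep1
      rw [hgp, hgp', hgr']
      by_cases hc : p.getD m 0 > p.getD (m-1) 0
      · rw [if_pos hc]
        rw [show PySem.List.pySetD r (m : Int) (1 + r.getD (m-1) 0) = r.set m (1 + r.getD (m-1) 0) by
          simp [PySem.List.pySetD_natCast]]
        constructor
        · simp [ihlen]
        · intro i hi
          by_cases him : i = m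
          · subst him
            rw [pv_getD_set_self r i _ (by omega), if_pos (by omega), hups, if_pos hc, hrm1]
            ring
          · rw [pv_getD_set_ne r m i _ (by omega), ihget i hi]
            by_cases hilt : i < m
            · rw [if_pos hilt, if_pos (by omega)]
            · rw [if_neg hilt, if_neg (by omega)]
      · rw [if_neg hc]
        refine ⟨ihlen, ?_⟩
        intro i hi
        rw [ihget i hi]
        by_cases him : i = m
        · subst him
          rw [if_neg (by omega), if_pos (by omega), hups, if_neg hc]
        · by_cases hilt : i < m
          · rw [if_pos hilt, if_pos (by omega)]
          · rw [if_neg hilt, if_neg (by omega)]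

-- backward sweep: processing indices k-1..0 turns the prefix into pointwise max with downs
lemma pv_loop2 (p : List Int) : ∀ k : Nat, ∀ t : List Int, k ≤ p.length - 1 → t.length = p.length →
    (∀ i : Nat, i < p.length → k ≤ i → t.getD i 0 = max ((pvUps p).getD i 0) ((pvDowns p).getD i 0)) →
    (∀ i : Nat, i < k → t.getD i 0 = (pvUps p).getD i 0) →
    ((PySem.List.pyRange ((k : Int) - 1) (-1) (-1)).foldl (pvStep2 p) t).length = p.length ∧
    ∀ i : Nat, i < p.length →
      ((PySem.List.pyRange ((k : Int) - 1) (-1) (-1)).foldl (pvStep2 p) t).getD i 0 =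
        max ((pvUps p).getD i 0) ((pvDowns p).getD i 0) := by
  intro k
  induction k with
  | zero =>
    intro t _ hlen hhi _
    rw [show ((0:Nat) : Int) - 1 = (-1 : Int) by norm_num]
    rw [PySem.List.pyRange_neg_one_eq_nil (by omega)]
    exact ⟨by simpa using hlen, fun i hi => by simpa using hhi i hi (by omega)⟩
  | succ k ih =>
    intro t hk hlen hhi hlo
    have hkp : k + 1 < p.length := by omega
    have hcons : PySem.List.pyRange (((k+1 : Nat) : Int) - 1) (-1) (-1) =
        (k : Int) :: PySem.List.pyRange ((k : Int) - 1) (-1) (-1) := by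
      rw [show (((k+1 : Nat) : Int) - 1) = (k : Int) by push_cast; ring]
      exact PySem.List.pyRange_neg_one_cons (by omega)
    rw [hcons, List.foldl_cons]
    have hcast : ((k : Int) + 1) = ((k + 1 : Nat) : Int) := by push_cast; ring
    have hgpk : PySem.List.pyGetD p (k : Int) 0 = p.getD k 0 := pv_getD_natCast p k
    have hgpk1 : PySem.List.pyGetD p ((k : Int) + 1) 0 = p.getD (k+1) 0 := by
      rw [hcast]; exact pv_getD_natCast p (k+1)
    have hgtk : PySem.List.pyGetD t (k : Int) 0 = t.getD k 0 := pv_getD_natCast t k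
    have hgtk1 : PySem.List.pyGetD t ((k : Int) + 1) 0 = t.getD (k+1) 0 := by
      rw [hcast]; exact pv_getD_natCast t (k+1)
    have htk : t.getD k 0 = (pvUps p).getD k 0 := hlo k (by omega)
    have htk1 : t.getD (k+1) 0 = max ((pvUps p).getD (k+1) 0) ((pvDowns p).getD (k+1) 0) :=
      hhi (k+1) hkp (by omega)
    have hdownsk := pvDowns_succ p k hkp
    have hupsk1 := pvUps_succ p k hkp
    have hdpos := pvDowns_pos p (k+1) hkp
    unfold pvStep2
    rw [hgpk, hgpk1, hgtk, hgtk1]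
    by_cases hc : p.getD k 0 > p.getD (k+1) 0
    · rw [if_pos hc]
      rw [show PySem.List.pySetD t (k : Int) (max (t.getD k 0) (1 + t.getD (k+1) 0)) =
            t.set k (max (t.getD k 0) (1 + t.getD (k+1) 0)) by simp [PySem.List.pySetD_natCast]]
      have hval : max (t.getD k 0) (1 + t.getD (k+1) 0) =
          max ((pvUps p).getD k 0) ((pvDowns p).getD k 0) := by
        rw [htk, htk1, hdownsk, if_pos hc, hupsk1, if_neg (by omega)]
        omega
      apply ih
      · omega
      · simpa using hlen
      · intro i hi hki
        by_cases hik : i = k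
        · subst hik
          rw [pv_getD_set_self t i _ (by omega), hval]
        · rw [pv_getD_set_ne t k i _ (by omega)]
          exact hhi i hi (by omega)
      · intro i hik
        rw [pv_getD_set_ne t k i _ (by omega)]
        exact hlo i (by omega)
    · rw [if_neg hc]
      apply ih
      · omega
      · exact hlen
      · intro i hi hki
        by_cases hik : i = k
        · subst hik
          rw [htk, hdownsk, if_neg hc]
          have := pvUps_pos p i (by omega)
          omega
        · exact hhi i hi (by omega)
      · intro i hik
        exact hlo i (by omega)

lemma a_eq_pvS (p : List Int) : calculate_bonus p = pvS p := by
  cases hp : p with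
  | nil =>
    rw [calculate_bonus_eq]
    simp only [List.length_nil, List.map_nil, Nat.cast_zero]
    rw [PySem.List.pyRange_one_eq_nil (by norm_num), List.foldl_nil]
    rw [PySem.List.pyRange_neg_one_eq_nil (by norm_num), List.foldl_nil]
    simp [pvS, pvUps, pvDowns]
  | cons x tl =>
    rw [← hp]
    have hne : p ≠ [] := by rw [hp]; simp
    have hlen1 : 1 ≤ p.length := by rw [hp]; simp
    rw [calculate_bonus_eq]
    obtain ⟨h1len, h1get⟩ := pv_loop1 p p.length hlen1 (le_refl _)
    set t1 := (PySem.List.pyRange 1 (p.length : Int) 1).foldl (pvStep1 p) (p.map (fun _ => (1:Int))) with ht1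
    have hcast2 : ((p.length : Int) - 2) = (((p.length - 1 : Nat) : Int) - 1) := by omega
    rw [hcast2]
    obtain ⟨h2len, h2get⟩ := pv_loop2 p (p.length - 1) t1 (le_refl _) h1len
      (by
        intro i hi hki
        have : i = p.length - 1 := by omega
        subst this
        rw [h1get _ hi, if_pos (by omega), pvDowns_last p hne]
        have := pvUps_pos p (p.length - 1) hi
        omega)
      (by
        intro i hik
        rw [h1get i (by omega), if_pos (by omega)])
    set t2 := (PySem.List.pyRange (((p.length - 1 : Nat) : Int) - 1) (-1) (-1)).foldl (pvStep2 p) t1 with ht2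
    have : t2 = List.zipWith max (pvUps p) (pvDowns p) := by
      apply List.ext_getElem
      · rw [h2len]
        simp [pvUps_length, pvDowns_length]
      · intro i hi hj
        have hip : i < p.length := by rw [← h2len]; exact hi
        have h2 := h2get i hip
        rw [List.getD_eq_getElem _ _ hi] at h2
        rw [h2, List.getElem_zipWith]
        rw [List.getD_eq_getElem _ _ (by rw [pvUps_length]; exact hip),
            List.getD_eq_getElem _ _ (by rw [pvDowns_length]; exact hip)]
    rw [this, pvS]

-- ===== VERDICT (by name: the statement is the Claim_ definition above) =====
theorem calculate_bonus_spec : Claim_equal_calculate_bonus := by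
  intro p _
  unfold Spec_calculate_bonus
  rw [a_eq_pvS, alt_eq_pvS]
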